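-- pv_equiv track=rewrite | github.com/jcorbin/alphahack | binartic.py | spliterate
-- ===== SOURCE A (Python) =====
-- def spliterate(s: str, sep: str, trim: bool = False):
--     fin = ''
--     while s:
--         part, fin, s = s.partition(sep)
--         if trim and not part: continue
--         yield part
--         break
--     while s:
--         part, fin, s = s.partition(sep)
--         yield part
--     if not trim and fin: yield ''
-- ===== SOURCE B (Python) =====
-- def spliterate(s: str, sep: str, trim: bool = False):
--     # B: one str.split call plus index post-processing, instead of A's repeated partition loop.
--     if not s:
--         return
--     parts = s.split(sep)
--     if not trim:
--         yield from parts
--         return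
--     i = 0
--     while i < len(parts) and not parts[i]:
--         i += 1
--     parts = parts[i:]
--     if parts and not parts[-1]:
--         parts.pop()
--     yield from parts
-- ===== Notes on version B (the rewrite author's own statement) =====
-- stated objective: simpler
-- what changed: B replaces A's hand-rolled repeated str.partition generator loops with a single s.split(sep) call followed by index post-processing (skip leading empties, pop at most one trailing empty) for trim=True.
import Mathlib
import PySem

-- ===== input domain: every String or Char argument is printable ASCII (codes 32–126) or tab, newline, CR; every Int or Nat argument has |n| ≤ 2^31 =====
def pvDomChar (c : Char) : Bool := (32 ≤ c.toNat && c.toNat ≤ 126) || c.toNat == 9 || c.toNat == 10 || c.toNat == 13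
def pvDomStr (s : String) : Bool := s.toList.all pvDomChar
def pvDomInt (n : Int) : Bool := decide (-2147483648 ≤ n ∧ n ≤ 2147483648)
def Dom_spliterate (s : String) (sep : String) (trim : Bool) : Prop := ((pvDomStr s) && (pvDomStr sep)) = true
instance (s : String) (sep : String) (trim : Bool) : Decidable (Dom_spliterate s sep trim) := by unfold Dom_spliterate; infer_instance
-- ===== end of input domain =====

-- B replaces A's repeated-partition generator loops by one split call plus post-processing
-- (objective: simpler); equivalence is about the yielded list.

-- ===== PORT A =====
-- Python str.find-style first-occurrence search, hand-ported (exact for the occurrence index).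
def pvFindSub (l : List Char) (sep : List Char) : Option Nat :=
  if sep.isPrefixOf l then some 0
  else match l with
    | [] => none
    | _ :: rest => (pvFindSub rest sep).map (· + 1)

-- s.partition(sep) → (before, matched-sep-or-empty, after); exact for nonempty sep.
def pvPartition (l : List Char) (sep : List Char) : List Char × List Char × List Char :=
  match pvFindSub l sep with
  | none => (l, [], [])
  | some i => (l.take i, sep, l.drop (i + sep.length))

-- A's second `while s` loop plus the final `if not trim and fin: yield ''`.
-- fuel only makes the loop total (one unit per iteration; never exhausted when l.length < fuel).
def pvLoop2 (fuel : Nat) (sep : List Char) (l : List Char) (fin : List Char) (trim : Bool) :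
    List (List Char) :=
  match fuel with
  | 0 => []
  | f + 1 =>
    if l = [] then (if !trim && fin ≠ [] then [[]] else [])
    else
      let p := pvPartition l sep
      p.1 :: pvLoop2 f sep p.2.2 p.2.1 trim

-- A's first `while s` loop (skip empty parts while trim, yield one part, break into loop 2).
def pvLoop1 (fuel : Nat) (sep : List Char) (l : List Char) (fin : List Char) (trim : Bool) :
    List (List Char) :=
  match fuel with
  | 0 => []
  | f + 1 =>
    if l = [] then (if !trim && fin ≠ [] then [[]] else [])
    else
      let p := pvPartition l sep
      if trim && p.1 = [] then pvLoop1 f sep p.2.2 p.2.1 trim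
      else p.1 :: pvLoop2 f sep p.2.2 p.2.1 trim

def spliterate (s : String) (sep : String) (trim : Bool) : List String :=
  (pvLoop1 (s.toList.length + 1) sep.toList s.toList [] trim).map String.ofList

-- ===== PORT B =====
-- B's `while i < len(parts) and not parts[i]: i += 1` followed by `parts = parts[i:]`.
def pvSkipEmpty (parts : List String) : List String :=
  match parts with
  | [] => []
  | p :: rest => if p = "" then pvSkipEmpty rest else p :: rest

-- B's `if parts and not parts[-1]: parts.pop()`.
def pvPopTrailingEmpty (parts : List String) : List String :=
  if parts.getLast? = some "" then parts.dropLast else parts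

def spliterate_alt (s : String) (sep : String) (trim : Bool) : List String :=
  if s = "" then []
  else
    match PySem.Str.split? s sep with
    | none => []   -- sep = "": Python raises ValueError here; excluded by Pre_
    | some parts => if trim then pvPopTrailingEmpty (pvSkipEmpty parts) else parts

-- ===== PRECONDITION & SPEC =====
-- Pre_ excludes exactly sep = "" with nonempty s: there BOTH A and B raise
-- ValueError (str.partition / str.split with an empty separator); A returns on all of Pre_.
def Pre_spliterate (s : String) (sep : String) (trim : Bool) : Prop := sep ≠ "" ∨ s = ""
instance (s : String) (sep : String) (trim : Bool) : Decidable (Pre_spliterate s sep trim) := by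
  unfold Pre_spliterate; infer_instance

def pvWitness_spliterate : String × String × Bool := ("a,b", ",", true)

def Spec_spliterate (s : String) (sep : String) (trim : Bool) (out : List String) : Prop :=
  out = spliterate_alt s sep trim
instance (s : String) (sep : String) (trim : Bool) (out : List String) :
    Decidable (Spec_spliterate s sep trim out) := by unfold Spec_spliterate; infer_instance

-- ===== CLAIM (what is proved, stated in full; the proofs are below) =====
def Claim_equal_spliterate : Prop := ∀ (s : String) (sep : String) (trim : Bool),
  Dom_spliterate s sep trim → Pre_spliterate s sep trim →
  Spec_spliterate s sep trim (spliterate s sep trim)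

-- ===== LEMMAS AND PROOFS =====

-- List-Char-level mirrors of B's two post-processing helpers (proof-only).
def pvSkipEmptyL (parts : List (List Char)) : List (List Char) :=
  match parts with
  | [] => []
  | p :: rest => if p = [] then pvSkipEmptyL rest else p :: rest

def pvPopTrailingEmptyL (parts : List (List Char)) : List (List Char) :=
  if parts.getLast? = some [] then parts.dropLast else parts

-- Reference splitter: the direct partition-based recursion both sides are reduced to.
def pvRefSplit (fuel : Nat) (sep : List Char) (l : List Char) : List (List Char) :=
  match fuel with
  | 0 => []
  | f + 1 =>
    match pvFindSub l sep with
    | none => [l]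
    | some i => l.take i :: pvRefSplit f sep (l.drop (i + sep.length))

def pvConsHead (p : List Char) (parts : List (List Char)) : List (List Char) :=
  match parts with
  | [] => [p]
  | h :: t => (p ++ h) :: t

theorem pvRefSplit_ne_nil (f : Nat) (sep l : List Char) (hf : 0 < f) :
    pvRefSplit f sep l ≠ [] := by
  cases f with
  | zero => omega
  | succ f =>
    simp only [pvRefSplit]
    cases pvFindSub l sep <;> simp

theorem pvFindSub_nil (sep : List Char) (hsep : sep ≠ []) : pvFindSub [] sep = none := by
  cases sep with
  | nil => simp_all
  | cons c t => simp [pvFindSub, List.isPrefixOf]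

theorem pvFindSub_some_ne_nil (l sep : List Char) (i : Nat) (hsep : sep ≠ [])
    (h : pvFindSub l sep = some i) : l ≠ [] := by
  intro hl; subst hl; rw [pvFindSub_nil sep hsep] at h; simp at h

theorem pvSepLen_pos (sep : List Char) (hsep : sep ≠ []) : 0 < sep.length := by
  cases sep <;> simp_all

theorem pvDrop_lt (l sep : List Char) (i : Nat) (hsep : sep ≠ []) (hl : l ≠ []) :
    (l.drop (i + sep.length)).length < l.length := by
  have h1 := pvSepLen_pos sep hsep
  have h2 : 0 < l.length := by cases l <;> simp_all
  simp only [List.length_drop]; omega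

theorem pvRefSplit_fuel (sep : List Char) (hsep : sep ≠ []) :
    ∀ f1 f2 l, l.length < f1 → l.length < f2 →
      pvRefSplit f1 sep l = pvRefSplit f2 sep l := by
  intro f1
  induction f1 with
  | zero => intro f2 l h1 _; omega
  | succ f1 ih =>
    intro f2 l h1 h2
    cases f2 with
    | zero => omega
    | succ f2 =>
      simp only [pvRefSplit]
      cases hfind : pvFindSub l sep with
      | none => rfl
      | some i =>
        have hl := pvFindSub_some_ne_nil l sep i hsep hfind
        have hlen := pvDrop_lt l sep i hsep hl
        simp only [ih f2 (l.drop (i + sep.length)) (by omega) (by omega)]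

-- one unfold of pvRefSplit at sufficient fuel, tail fuel renormalised
theorem pvRefSplit_unfold (sep l : List Char) (f : Nat) (hsep : sep ≠ []) (hf : l.length < f) :
    pvRefSplit f sep l =
      match pvFindSub l sep with
      | none => [l]
      | some i => l.take i ::
          pvRefSplit ((l.drop (i + sep.length)).length + 1) sep (l.drop (i + sep.length)) := by
  cases f with
  | zero => omega
  | succ f =>
    have hstep : pvRefSplit (f + 1) sep l =
        match pvFindSub l sep with
        | none => [l]
        | some i => l.take i :: pvRefSplit f sep (l.drop (i + sep.length)) := rfl
    rw [hstep]
    cases hfind : pvFindSub l sep with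
    | none => rfl
    | some i =>
      have hl := pvFindSub_some_ne_nil l sep i hsep hfind
      have hlen := pvDrop_lt l sep i hsep hl
      simp only [pvRefSplit_fuel sep hsep f ((l.drop (i + sep.length)).length + 1)
        (l.drop (i + sep.length)) (by omega) (by omega)]

theorem pvPopTrailingEmptyL_cons (a : List Char) (X : List (List Char)) (hX : X ≠ []) :
    pvPopTrailingEmptyL (a :: X) = a :: pvPopTrailingEmptyL X := by
  cases X with
  | nil => exact absurd rfl hX
  | cons b t =>
    unfold pvPopTrailingEmptyL
    rw [List.getLast?_cons_cons, List.dropLast_cons₂]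
    split <;> rfl

theorem pvLoop2_nil (f : Nat) (sep fin : List Char) (trim : Bool) (hf : 0 < f) :
    pvLoop2 f sep [] fin trim = if !trim && fin ≠ [] then [[]] else [] := by
  cases f with
  | zero => omega
  | succ f => simp [pvLoop2]

-- A's loop 2 computes pvRefSplit, with the trailing empty kept iff ¬trim.
theorem pvLoop2_eq (sep : List Char) (hsep : sep ≠ []) :
    ∀ fuel l fin trim, l.length < fuel → l ≠ [] →
      pvLoop2 fuel sep l fin trim =
        (if trim then pvPopTrailingEmptyL (pvRefSplit (l.length + 1) sep l)
         else pvRefSplit (l.length + 1) sep l) := by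
  intro fuel
  induction fuel with
  | zero => intro l fin trim h _; omega
  | succ f ih =>
    intro l fin trim hf hl
    simp only [pvLoop2, if_neg hl]
    rw [pvRefSplit_unfold sep l (l.length + 1) hsep (by omega)]
    have hfpos : 0 < f := by
      have : 0 < l.length := by cases l <;> simp_all
      omega
    cases hfind : pvFindSub l sep with
    | none =>
      simp only [pvPartition, hfind]
      rw [pvLoop2_nil f sep [] trim hfpos]
      cases trim <;> simp [pvPopTrailingEmptyL, hl]
    | some i =>
      simp only [pvPartition, hfind]
      set d := l.drop (i + sep.length) with hd
      have hdl : d.length < l.length := pvDrop_lt l sep i hsep hl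
      by_cases hdnil : d = []
      · rw [hdnil, pvLoop2_nil f sep sep trim hfpos]
        have hrnil : pvRefSplit (d.length + 1) sep d = [[]] := by
          rw [hdnil]; simp [pvRefSplit, pvFindSub_nil sep hsep]
        rw [hdnil] at hrnil
        rw [hrnil]
        cases trim <;> simp [pvPopTrailingEmptyL, hsep]
      · rw [ih d sep trim (by omega) hdnil]
        have hr := pvRefSplit_ne_nil (d.length + 1) sep d (by omega)
        cases trim
        · simp
        · simp [pvPopTrailingEmptyL_cons _ _ hr]

-- with trim = False A's first loop is one iteration of the second loop
theorem pvLoop1_false (sep : List Char) :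
    ∀ fuel l fin, pvLoop1 fuel sep l fin false = pvLoop2 fuel sep l fin false := by
  intro fuel l fin
  cases fuel <;> simp [pvLoop1, pvLoop2]

-- with trim = True A's first loop drops leading empties; B pops one trailing empty after
theorem pvLoop1_true (sep : List Char) (hsep : sep ≠ []) :
    ∀ fuel l fin, l.length < fuel →
      pvLoop1 fuel sep l fin true =
        pvPopTrailingEmptyL (pvSkipEmptyL (pvRefSplit (l.length + 1) sep l)) := by
  intro fuel
  induction fuel with
  | zero => intro l fin h; omega
  | succ f ih =>
    intro l fin hf
    by_cases hl : l = []
    · subst hl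
      simp [pvLoop1, pvRefSplit, pvFindSub_nil sep hsep, pvSkipEmptyL, pvPopTrailingEmptyL]
    · have hfpos : 0 < f := by
        have : 0 < l.length := by cases l <;> simp_all
        omega
      simp only [pvLoop1, if_neg hl]
      rw [pvRefSplit_unfold sep l (l.length + 1) hsep (by omega)]
      cases hfind : pvFindSub l sep with
      | none =>
        simp only [pvPartition, hfind]
        rw [if_neg (by simp [hl]), pvLoop2_nil f sep [] true hfpos]
        simp [pvSkipEmptyL, hl, pvPopTrailingEmptyL]
      | some i =>
        simp only [pvPartition, hfind]
        set d := l.drop (i + sep.length) with hd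
        have hdl : d.length < l.length := pvDrop_lt l sep i hsep hl
        by_cases hi : l.take i = []
        · -- empty part: A skips it, B's skipEmpty drops it
          rw [if_pos (by simp [hi]), ih d sep (by omega)]
          simp [pvSkipEmptyL, hi]
        · -- nonempty part: A yields it and enters loop 2
          rw [if_neg (by simp [hi])]
          simp only [pvSkipEmptyL, if_neg hi]
          by_cases hdnil : d = []
          · have hrnil : pvRefSplit (d.length + 1) sep d = [[]] := by
              rw [hdnil]; simp [pvRefSplit, pvFindSub_nil sep hsep]
            rw [hrnil, hdnil, pvLoop2_nil f sep sep true hfpos]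
            simp [pvPopTrailingEmptyL]
          · rw [pvLoop2_eq sep hsep f d sep true (by omega) hdnil]
            have hr := pvRefSplit_ne_nil (d.length + 1) sep d (by omega)
            simp [pvPopTrailingEmptyL_cons _ _ hr]

-- PySem's splitOn.go equals pvRefSplit up to the running accumulators
theorem pvGo_eq (sep : List Char) (hsep : sep ≠ []) :
    ∀ fuel l cur acc, l.length < fuel →
      PySem.Chars.splitOn.go sep fuel l cur acc =
        acc.reverse ++ pvConsHead cur.reverse (pvRefSplit (l.length + 1) sep l) := by
  intro fuel
  induction fuel with
  | zero => intro l cur acc h; omega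
  | succ f ih =>
    intro l cur acc hf
    cases l with
    | nil =>
      simp [PySem.Chars.splitOn.go, pvRefSplit, pvFindSub_nil sep hsep, pvConsHead]
    | cons c rest =>
      rw [pvRefSplit_unfold sep (c :: rest) _ hsep (by omega)]
      by_cases hpre : sep.isPrefixOf (c :: rest)
      · -- separator at the head: pvFindSub = some 0
        have hfind : pvFindSub (c :: rest) sep = some 0 := by
          unfold pvFindSub; rw [if_pos hpre]
        rw [hfind]
        have hstep : PySem.Chars.splitOn.go sep (f + 1) (c :: rest) cur acc =
            PySem.Chars.splitOn.go sep f ((c :: rest).drop (0 + sep.length)) []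
              (cur.reverse :: acc) := by
          simp [PySem.Chars.splitOn.go, hpre]
        rw [hstep]
        have hdl : ((c :: rest).drop (0 + sep.length)).length < (c :: rest).length :=
          pvDrop_lt (c :: rest) sep 0 hsep (by simp)
        rw [ih ((c :: rest).drop (0 + sep.length)) [] (cur.reverse :: acc) (by omega)]
        have hr := pvRefSplit_ne_nil (((c :: rest).drop (0 + sep.length)).length + 1) sep
          ((c :: rest).drop (0 + sep.length)) (by omega)
        cases hcase : pvRefSplit (((c :: rest).drop (0 + sep.length)).length + 1) sep
            ((c :: rest).drop (0 + sep.length)) with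
        | nil => exact absurd hcase hr
        | cons h tl =>
          simp only [Nat.zero_add, List.length_drop, List.length_cons] at hcase
          simp [pvConsHead, hcase]
      · -- no separator at the head: consume one character
        have hstep : PySem.Chars.splitOn.go sep (f + 1) (c :: rest) cur acc =
            PySem.Chars.splitOn.go sep f rest (c :: cur) acc := by
          simp [PySem.Chars.splitOn.go, hpre]
        rw [hstep, ih rest (c :: cur) acc (by simp at hf ⊢; omega)]
        have hfind : pvFindSub (c :: rest) sep = (pvFindSub rest sep).map (· + 1) := by
          conv_lhs => rw [pvFindSub]
          rw [if_neg hpre]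
        rw [hfind]
        rw [pvRefSplit_unfold sep rest (rest.length + 1) hsep (by omega)]
        cases hrf : pvFindSub rest sep with
        | none => simp [pvConsHead]
        | some i =>
          have hto : (c :: rest).take (i + 1) = c :: rest.take i := by simp
          have hdo : (c :: rest).drop (i + 1 + sep.length) = rest.drop (i + sep.length) := by
            simp [Nat.add_right_comm]
          simp only [Option.map_some, pvConsHead, hto, hdo]
          simp

theorem pvSplitOn_eq (sep l : List Char) (hsep : sep ≠ []) :
    PySem.Chars.splitOn l sep = pvRefSplit (l.length + 1) sep l := by
  unfold PySem.Chars.splitOn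
  rw [pvGo_eq sep hsep (l.length + 1) l [] [] (by omega)]
  have hr := pvRefSplit_ne_nil (l.length + 1) sep l (by omega)
  cases hcase : pvRefSplit (l.length + 1) sep l with
  | nil => exact absurd hcase hr
  | cons h t => simp [pvConsHead]

-- bridges: B's String-level helpers commute with map String.ofList
theorem pvOfList_eq_empty_iff (x : List Char) : String.ofList x = "" ↔ x = [] := by
  constructor
  · intro h
    have := congrArg String.toList h
    simpa using this
  · intro h; subst h; rfl

theorem pvSkipEmpty_map (xs : List (List Char)) :
    pvSkipEmpty (xs.map String.ofList) = (pvSkipEmptyL xs).map String.ofList := by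
  induction xs with
  | nil => rfl
  | cons p rest ih =>
    simp only [List.map_cons, pvSkipEmpty, pvSkipEmptyL]
    by_cases hp : p = []
    · subst hp; simpa using ih
    · rw [if_neg (by simpa [pvOfList_eq_empty_iff] using hp), if_neg hp]
      simp

theorem pvPopTrailingEmpty_map (xs : List (List Char)) :
    pvPopTrailingEmpty (xs.map String.ofList) = (pvPopTrailingEmptyL xs).map String.ofList := by
  unfold pvPopTrailingEmpty pvPopTrailingEmptyL
  rw [List.getLast?_map]
  cases hlast : xs.getLast? with
  | none => simp
  | some y =>
    by_cases hy : y = []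
    · subst hy; simp [List.map_dropLast]
    · rw [if_neg (by simp [hy]), if_neg (by simp [hy])]

-- ===== VERDICT (by name: the statement is the Claim_ definition above) =====
theorem spliterate_spec : Claim_equal_spliterate := by
  intro s sep trim _ hpre
  unfold Spec_spliterate
  by_cases hs : s = ""
  · subst hs
    cases trim <;> simp [spliterate, spliterate_alt, pvLoop1]
  · have hsep : sep ≠ "" := by
      rcases hpre with h | h
      · exact h
      · exact absurd h hs
    have hsepl : sep.toList ≠ [] := by
      intro h; exact hsep (by simpa [← pvOfList_eq_empty_iff] using congrArg String.ofList h)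
    have hl : s.toList ≠ [] := by
      intro h; exact hs (by simpa [← pvOfList_eq_empty_iff] using congrArg String.ofList h)
    have hsplit : PySem.Str.split? s sep =
        some ((pvRefSplit (s.toList.length + 1) sep.toList s.toList).map String.ofList) := by
      simp [PySem.Str.split?, PySem.Chars.split?, List.isEmpty_iff, hsepl,
        pvSplitOn_eq sep.toList s.toList hsepl]
    cases trim with
    | false =>
      simp only [spliterate, spliterate_alt, if_neg hs, hsplit, Bool.false_eq_true, reduceIte]
      rw [pvLoop1_false, pvLoop2_eq sep.toList hsepl _ _ [] false (by omega) hl]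
      simp
    | true =>
      simp only [spliterate, spliterate_alt, if_neg hs, hsplit, reduceIte]
      rw [pvLoop1_true sep.toList hsepl _ _ [] (by omega)]
      rw [pvSkipEmpty_map, pvPopTrailingEmpty_map]
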